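-- pv_equiv track=rewrite | github.com/cillian-wang/cc-dashboard | src/cc_dashboard/__main__.py | get_current_task
-- ===== SOURCE A (Python) =====
-- def get_current_task(todos):
--     for t in todos:
--         if t.get("status") == "in_progress":
--             return t.get("content", t.get("subject", ""))
--     for t in todos:
--         if t.get("status") == "pending":
--             return f"(next) {t.get('content', t.get('subject', ''))}"
--     return ""
-- ===== SOURCE B (Python) =====
-- def get_current_task(todos):
--     pending = None
--     for t in todos:
--         if t.get("status") == "in_progress":
--             return t.get("content", t.get("subject", ""))
--         if pending is None and t.get("status") == "pending":
--             pending = t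
--     if pending is not None:
--         return f"(next) {pending.get('content', pending.get('subject', ''))}"
--     return ""
-- ===== Notes on version B (the rewrite author's own statement) =====
-- stated objective: alternative
-- what changed: Single pass maintaining the first pending candidate in a variable instead of two full scans (in_progress scan, then pending scan).
import Mathlib
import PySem

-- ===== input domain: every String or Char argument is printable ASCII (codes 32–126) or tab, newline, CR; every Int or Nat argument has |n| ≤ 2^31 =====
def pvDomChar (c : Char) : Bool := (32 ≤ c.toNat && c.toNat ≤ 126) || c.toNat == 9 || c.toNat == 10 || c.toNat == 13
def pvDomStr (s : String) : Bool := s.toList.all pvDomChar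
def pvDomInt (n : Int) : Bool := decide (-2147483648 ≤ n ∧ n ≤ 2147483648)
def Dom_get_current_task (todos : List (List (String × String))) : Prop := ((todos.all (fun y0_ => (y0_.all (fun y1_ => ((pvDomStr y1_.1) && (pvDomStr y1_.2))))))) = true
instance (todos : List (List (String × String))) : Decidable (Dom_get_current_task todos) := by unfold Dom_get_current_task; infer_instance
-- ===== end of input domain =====

-- B fuses A's two scans into one pass that remembers the first pending todo; objective: alternative decomposition.


-- dicts are association lists; d.get(k) = first match (Option), d.get(k, dflt) with default
def pvGet? (d : List (String × String)) (k : String) : Option String :=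
  match d.find? (fun p => p.1 == k) with
  | some p => some p.2
  | none => none

def pvGetD (d : List (String × String)) (k dflt : String) : String :=
  match pvGet? d k with
  | some v => v
  | none => dflt

-- t.get("content", t.get("subject", ""))
def pvContent (t : List (String × String)) : String :=
  pvGetD t "content" (pvGetD t "subject" "")

-- ===== PORT A =====
-- first loop: return content of first in_progress todo
def gctA_loop1 : List (List (String × String)) → Option String
  | [] => none
  | t :: rest =>
    if pvGet? t "status" == some "in_progress" then some (pvContent t)
    else gctA_loop1 rest

-- second loop: return "(next) " + content of first pending todo
def gctA_loop2 : List (List (String × String)) → Option String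
  | [] => none
  | t :: rest =>
    if pvGet? t "status" == some "pending" then some ("(next) " ++ pvContent t)
    else gctA_loop2 rest

def get_current_task (todos : List (List (String × String))) : String :=
  match gctA_loop1 todos with
  | some s => s
  | none =>
    match gctA_loop2 todos with
    | some s => s
    | none => ""

-- ===== PORT B =====
-- single pass with a remembered first-pending candidate
def gctB_loop : List (List (String × String)) → Option (List (String × String)) → String
  | [], pending =>
    match pending with
    | some t => "(next) " ++ pvContent t
    | none => ""
  | t :: rest, pending =>
    if pvGet? t "status" == some "in_progress" then pvContent t
    else if pending == none && pvGet? t "status" == some "pending" then gctB_loop rest (some t)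
    else gctB_loop rest pending

def get_current_task_alt (todos : List (List (String × String))) : String :=
  gctB_loop todos none

-- ===== PRECONDITION & SPEC =====
def Spec_get_current_task (todos : List (List (String × String))) (out : String) : Prop := out = get_current_task_alt todos
instance (todos : List (List (String × String))) (out : String) : Decidable (Spec_get_current_task todos out) := by unfold Spec_get_current_task; infer_instance

-- ===== CLAIM (what is proved, stated in full; the proofs are below) =====
def Claim_equal_get_current_task : Prop := ∀ (todos : List (List (String × String))), Dom_get_current_task todos → Spec_get_current_task todos (get_current_task todos)

-- ===== LEMMAS AND PROOFS =====
theorem gctB_loop_eq (todos : List (List (String × String))) :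
    ∀ pending : Option (List (String × String)),
      gctB_loop todos pending =
        match gctA_loop1 todos with
        | some s => s
        | none =>
          match pending with
          | some t => "(next) " ++ pvContent t
          | none =>
            match gctA_loop2 todos with
            | some s => s
            | none => "" := by
  induction todos with
  | nil => intro pending; rfl
  | cons t rest ih =>
    intro pending
    simp only [gctB_loop, gctA_loop1, gctA_loop2]
    by_cases h1 : pvGet? t "status" == some "in_progress"
    · simp [h1]
    · simp only [h1]
      by_cases h2 : pvGet? t "status" == some "pending"
      · cases pending with
        | none => simp [h2, ih]
        | some p => simp [h2, ih]
      · cases pending with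
        | none => simp [h2, ih]
        | some p => simp [h2, ih]

-- ===== VERDICT (by name: the statement is the Claim_ definition above) =====
theorem get_current_task_spec : Claim_equal_get_current_task := by
  intro todos _
  unfold Spec_get_current_task get_current_task get_current_task_alt
  rw [gctB_loop_eq]
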